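-- pv_equiv track=rewrite | github.com/itselavia/local-ai-usage-dashboard | dashboard/estimates.py | claude_pricing_key
-- ===== SOURCE A (Python) =====
-- CLAUDE_MODEL_LABELS = {
--     "claude-opus-4-6": "Claude Opus 4.6",
--     "claude-opus-4-5": "Claude Opus 4.5",
--     "claude-opus-4-1": "Claude Opus 4.1",
--     "claude-opus-4": "Claude Opus 4",
--     "claude-sonnet-4-6": "Claude Sonnet 4.6",
--     "claude-sonnet-4-5": "Claude Sonnet 4.5",
--     "claude-sonnet-4": "Claude Sonnet 4",
--     "claude-sonnet-3-7": "Claude Sonnet 3.7",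
--     "claude-haiku-4-5": "Claude Haiku 4.5",
--     "claude-haiku-3-5": "Claude Haiku 3.5",
--     "claude-haiku-3": "Claude Haiku 3",
-- }
--
-- def claude_pricing_key(model: str) -> str | None:
--     normalized = (model or "").strip().lower()
--     if not normalized or normalized.startswith("<"):
--         return None
--
--     for key in CLAUDE_MODEL_LABELS:
--         if normalized == key or normalized.startswith(f"{key}-"):
--             return key
--
--     return None
-- ===== SOURCE B (Python) =====
-- CLAUDE_MODEL_LABELS = {
--     "claude-opus-4-6": "Claude Opus 4.6",
--     "claude-opus-4-5": "Claude Opus 4.5",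
--     "claude-opus-4-1": "Claude Opus 4.1",
--     "claude-opus-4": "Claude Opus 4",
--     "claude-sonnet-4-6": "Claude Sonnet 4.6",
--     "claude-sonnet-4-5": "Claude Sonnet 4.5",
--     "claude-sonnet-4": "Claude Sonnet 4",
--     "claude-sonnet-3-7": "Claude Sonnet 3.7",
--     "claude-haiku-4-5": "Claude Haiku 4.5",
--     "claude-haiku-3-5": "Claude Haiku 3.5",
--     "claude-haiku-3": "Claude Haiku 3",
-- }
--
-- def claude_pricing_key(model: str) -> str | None:
--     normalized = (model or "").strip().lower()
--     if not normalized or normalized.startswith("<"):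
--         return None
--
--     parts = normalized.split("-")
--     for i in range(len(parts), 0, -1):
--         candidate = "-".join(parts[:i])
--         if candidate in CLAUDE_MODEL_LABELS:
--             return candidate
--
--     return None
-- ===== Notes on version B (the rewrite author's own statement) =====
-- stated objective: alternative
-- what changed: Instead of scanning the pricing dict testing each key as an exact or dash-prefix match against the model string, B splits the normalized model on dashes and walks its dash-prefixes from longest to shortest, looking each one up in the dict.
import Mathlib
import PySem

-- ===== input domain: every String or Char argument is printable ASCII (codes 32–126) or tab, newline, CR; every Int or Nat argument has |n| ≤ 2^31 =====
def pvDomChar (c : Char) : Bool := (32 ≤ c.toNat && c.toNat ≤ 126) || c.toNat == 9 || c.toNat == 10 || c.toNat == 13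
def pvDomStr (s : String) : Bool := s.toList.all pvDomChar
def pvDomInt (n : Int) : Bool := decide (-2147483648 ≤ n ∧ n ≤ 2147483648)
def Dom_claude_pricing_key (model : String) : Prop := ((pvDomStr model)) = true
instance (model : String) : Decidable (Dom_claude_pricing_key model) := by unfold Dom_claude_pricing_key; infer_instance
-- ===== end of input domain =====

-- B replaces A's scan over the pricing-dict keys (exact or dash-prefix test per key) by a walk over
-- the dash-separated prefixes of the model string, longest first, each looked up in the key list;
-- objective: alternative decomposition, same exact result.


-- module constant: the keys of CLAUDE_MODEL_LABELS in insertion order (the labels are never used)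
def pvKeys : List (List Char) :=
  ["claude-opus-4-6".toList, "claude-opus-4-5".toList, "claude-opus-4-1".toList,
   "claude-opus-4".toList, "claude-sonnet-4-6".toList, "claude-sonnet-4-5".toList,
   "claude-sonnet-4".toList, "claude-sonnet-3-7".toList, "claude-haiku-4-5".toList,
   "claude-haiku-3-5".toList, "claude-haiku-3".toList]

-- ===== PORT A =====
-- `for key in CLAUDE_MODEL_LABELS: if normalized == key or normalized.startswith(f"{key}-"): return key`
def pvScanA : List (List Char) → List Char → Option (List Char)
  | [], _ => none
  | k :: rest, nl =>
      if (nl == k || PySem.Chars.startswith nl (k ++ ['-'])) then some k else pvScanA rest nl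

-- `(model or "")` is `model` for a str argument (strip of "" is "" either way)
def claude_pricing_key (model : String) : Option String :=
  let normalized := PySem.Chars.lower (PySem.Chars.strip model.toList)
  if normalized.isEmpty || PySem.Chars.startswith normalized ['<'] then none
  else (pvScanA pvKeys normalized).map String.ofList

-- ===== PORT B =====
-- `for i in range(len(parts), 0, -1): candidate = "-".join(parts[:i]); if candidate in CLAUDE_MODEL_LABELS: return candidate`
def pvWalkB (parts : List (List Char)) : Nat → Option (List Char)
  | 0 => none
  | Nat.succ i =>
      let cand := PySem.Chars.join ['-'] (parts.take (i + 1))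
      if pvKeys.contains cand then some cand else pvWalkB parts i

def claude_pricing_key_alt (model : String) : Option String :=
  let normalized := PySem.Chars.lower (PySem.Chars.strip model.toList)
  if normalized.isEmpty || PySem.Chars.startswith normalized ['<'] then none
  else
    let parts := PySem.Chars.splitOn normalized ['-']
    (pvWalkB parts parts.length).map String.ofList

-- ===== PRECONDITION & SPEC =====
def Spec_claude_pricing_key (model : String) (out : Option String) : Prop := out = claude_pricing_key_alt model
instance (model : String) (out : Option String) : Decidable (Spec_claude_pricing_key model out) := by unfold Spec_claude_pricing_key; infer_instance

-- ===== CLAIM (what is proved, stated in full; the proofs are below) =====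
def Claim_equal_claude_pricing_key : Prop := ∀ (model : String), Dom_claude_pricing_key model → Spec_claude_pricing_key model (claude_pricing_key model)

-- ===== LEMMAS AND PROOFS =====
theorem pv_intercalate_cons {α : Type} (s a : List α) (ys : List (List α)) (hy : ys ≠ []) :
    List.intercalate s (a :: ys) = a ++ s ++ List.intercalate s ys := by
  cases ys with
  | nil => exact absurd rfl hy
  | cons b t => simp [List.intercalate, List.append_assoc]

theorem pv_intercalate_app {α : Type} (s : List α) (xs ys : List (List α)) (hx : xs ≠ []) (hy : ys ≠ []) :
    List.intercalate s (xs ++ ys) = List.intercalate s xs ++ s ++ List.intercalate s ys := by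
  induction xs with
  | nil => exact absurd rfl hx
  | cons a xs ih =>
    cases xs with
    | nil =>
      rw [List.singleton_append, pv_intercalate_cons s a ys hy]; simp [List.intercalate]
    | cons x xs' =>
      rw [List.cons_append, pv_intercalate_cons s a _ (by simp),
          pv_intercalate_cons s a _ (by simp), ih (by simp)]
      simp [List.append_assoc]

theorem pv_go_spec (c : Char) (l : List Char) (fuel : Nat) (cur : List Char) (acc : List (List Char))
    (h : l.length ≤ fuel) :
    PySem.Chars.splitOn.go [c] fuel l cur acc
      = acc.reverse ++ (List.splitOnP (fun x => x == c) l).modifyHead (cur.reverse ++ ·) := by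
  induction l generalizing fuel cur acc with
  | nil =>
    cases fuel with
    | zero => simp [PySem.Chars.splitOn.go, List.splitOnP_nil]
    | succ f => simp [PySem.Chars.splitOn.go, List.splitOnP_nil]
  | cons x rest ih =>
    cases fuel with
    | zero => simp at h
    | succ f =>
      have hf : rest.length ≤ f := by simpa using h
      simp only [PySem.Chars.splitOn.go]
      by_cases hx : x = c
      · subst hx
        have : [x].isPrefixOf (x :: rest) = true := by simp [List.isPrefixOf]
        rw [this, if_pos rfl]
        simp only [List.length_cons, List.length_nil, List.drop_succ_cons, List.drop_zero]
        rw [ih f [] (cur.reverse :: acc) hf]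
        simp [List.splitOnP_cons]
        cases List.splitOnP (fun x_1 => x_1 == x) rest <;> simp
      · have : [c].isPrefixOf (x :: rest) = false := by
          simp [List.isPrefixOf]; exact fun h => absurd h.symm hx
        rw [this]; simp only [Bool.false_eq_true, if_false]
        rw [ih f (x :: cur) acc hf]
        rw [List.splitOnP_cons]
        have hxc : (x == c) = false := by simp [hx]
        rw [hxc]; simp only [Bool.false_eq_true, if_false, List.modifyHead_modifyHead]
        cases List.splitOnP (fun x_1 => x_1 == c) rest <;> simp

theorem pv_splitOn_eq (l : List Char) (c : Char) :
    PySem.Chars.splitOn l [c] = List.splitOnP (fun x => x == c) l := by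
  unfold PySem.Chars.splitOn
  rw [pv_go_spec c l (l.length + 1) [] [] (by omega)]
  cases List.splitOnP (fun x => x == c) l <;> simp

theorem pv_splitOnP_app (p : Char → Bool) (u v : List Char) (x : Char) (hx : p x = true) :
    List.splitOnP p (u ++ x :: v) = List.splitOnP p u ++ List.splitOnP p v := by
  induction u with
  | nil => simp [List.splitOnP_cons, hx, List.splitOnP_nil]
  | cons a u ih =>
    rw [List.cons_append, List.splitOnP_cons, List.splitOnP_cons, ih]
    by_cases ha : p a = true
    · simp [ha]
    · simp only [ha, Bool.false_eq_true, if_false]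
      have hne := List.splitOnP_ne_nil p u
      cases hu : List.splitOnP p u with
      | nil => exact absurd hu hne
      | cons s t => simp

def pvParts (l : List Char) : List (List Char) := List.splitOnP (fun x => x == '-') l
def pvCand (l : List Char) (j : Nat) : List Char := List.intercalate ['-'] ((pvParts l).take j)

theorem pv_cand_full (l : List Char) : pvCand l (pvParts l).length = l := by
  unfold pvCand pvParts
  rw [List.take_length]
  exact List.intercalate_splitOn l '-'

theorem pv_cand_match (l : List Char) (j : Nat) (h1 : 1 ≤ j) (h2 : j ≤ (pvParts l).length) :
    pvCand l j = l ∨ (pvCand l j ++ ['-']) <+: l := by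
  rcases eq_or_lt_of_le h2 with heq | hlt
  · left; rw [heq]; exact pv_cand_full l
  · right
    have hne : pvParts l ≠ [] := List.splitOnP_ne_nil _ l
    have htake : (pvParts l).take j ≠ [] := by
      intro hcon
      have := congrArg List.length hcon
      simp [List.length_take] at this
      rcases this with h | h
      · omega
      · exact hne h
    have hdrop : (pvParts l).drop j ≠ [] := by
      intro hcon
      have := congrArg List.length hcon
      simp [List.length_drop] at this
      omega
    have hl : l = pvCand l j ++ ['-'] ++ List.intercalate ['-'] ((pvParts l).drop j) := by
      have happ := pv_intercalate_app ['-'] ((pvParts l).take j) ((pvParts l).drop j) htake hdrop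
      rw [List.take_append_drop] at happ
      have hjoin : List.intercalate ['-'] (pvParts l) = l := by
        have := pv_cand_full l
        unfold pvCand at this; rw [List.take_length] at this; exact this
      unfold pvCand
      conv_lhs => rw [← hjoin]
      exact happ
    exact ⟨List.intercalate ['-'] ((pvParts l).drop j), hl.symm⟩

theorem pv_cand_prefix (l : List Char) (j j' : Nat) (h1 : 1 ≤ j) (h2 : j < j')
    (h3 : j' ≤ (pvParts l).length) : (pvCand l j ++ ['-']) <+: pvCand l j' := by
  have hsplit : (pvParts l).take j' = (pvParts l).take j ++ ((pvParts l).take j').drop j := by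
    conv_lhs => rw [← List.take_append_drop j ((pvParts l).take j')]
    rw [List.take_take, min_eq_left (le_of_lt h2)]
  have hlen : (((pvParts l).take j').drop j).length = j' - j := by
    rw [List.length_drop, List.length_take]
    omega
  have htake : (pvParts l).take j ≠ [] := by
    intro hcon
    have := congrArg List.length hcon
    simp [List.length_take] at this
    rcases this with h | h
    · omega
    · exact List.splitOnP_ne_nil _ l (by simpa using h)
  have hdrop : ((pvParts l).take j').drop j ≠ [] := by
    intro hcon
    have := congrArg List.length hcon
    rw [hlen] at this
    simp at this
    omega
  have := pv_intercalate_app ['-'] ((pvParts l).take j) (((pvParts l).take j').drop j) htake hdrop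
  unfold pvCand
  rw [hsplit, this]
  exact ⟨_, rfl⟩

theorem pv_key_cand (l k : List Char) (h : (k ++ ['-']) <+: l) :
    ∃ j, 1 ≤ j ∧ j ≤ (pvParts l).length ∧ pvCand l j = k := by
  obtain ⟨r, hr⟩ := h
  have hl : l = k ++ '-' :: r := by rw [← hr]; simp
  have hsplit : pvParts l = pvParts k ++ pvParts r := by
    unfold pvParts
    rw [hl]
    exact pv_splitOnP_app _ k r '-' (by simp)
  refine ⟨(pvParts k).length, ?_, ?_, ?_⟩
  · have := List.splitOnP_ne_nil (fun x => x == '-') k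
    have : (pvParts k).length ≠ 0 := fun hz => this (by simpa [pvParts] using List.eq_nil_of_length_eq_zero hz)
    omega
  · rw [hsplit]; simp
  · unfold pvCand
    rw [hsplit, List.take_left]
    have := pv_cand_full k
    unfold pvCand at this; rw [List.take_length] at this; exact this




def pvPm (k l : List Char) : Prop := l = k ∨ (k ++ ['-']) <+: l

theorem pv_test_iff (l k : List Char) :
    (l == k || PySem.Chars.startswith l (k ++ ['-'])) = true ↔ pvPm k l := by
  simp [pvPm, PySem.Chars.startswith_iff]

theorem pv_scanA_none_iff (ks : List (List Char)) (l : List Char) :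
    pvScanA ks l = none ↔ ∀ k ∈ ks, ¬ pvPm k l := by
  induction ks with
  | nil => simp [pvScanA]
  | cons k rest ih =>
    simp only [pvScanA]
    by_cases h : (l == k || PySem.Chars.startswith l (k ++ ['-'])) = true
    · rw [if_pos h]
      simp only [reduceCtorEq, false_iff]
      intro hall
      exact hall k (by simp) ((pv_test_iff l k).mp h)
    · rw [if_neg h, ih]
      constructor
      · intro hall k' hk'
        rcases List.mem_cons.mp hk' with rfl | hmem
        · exact fun hp => h ((pv_test_iff l k').mpr hp)
        · exact hall k' hmem
      · intro hall k' hk'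
        exact hall k' (List.mem_cons_of_mem _ hk')

theorem pv_scanA_some (ks : List (List Char)) (l k : List Char) (h : pvScanA ks l = some k) :
    ∃ pre post, ks = pre ++ k :: post ∧ pvPm k l ∧ ∀ k' ∈ pre, ¬ pvPm k' l := by
  induction ks with
  | nil => simp [pvScanA] at h
  | cons k0 rest ih =>
    simp only [pvScanA] at h
    by_cases ht : (l == k0 || PySem.Chars.startswith l (k0 ++ ['-'])) = true
    · rw [if_pos ht] at h
      injection h with h'
      subst h'
      exact ⟨[], rest, rfl, (pv_test_iff l k0).mp ht, by simp⟩
    · rw [if_neg ht] at h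
      obtain ⟨pre, post, hks, hpm, hpre⟩ := ih h
      refine ⟨k0 :: pre, post, by rw [hks]; rfl, hpm, ?_⟩
      intro k' hk'
      rcases List.mem_cons.mp hk' with rfl | hmem
      · exact fun hp => ht ((pv_test_iff l k').mpr hp)
      · exact hpre k' hmem

theorem pv_walk_none (parts : List (List Char)) (i : Nat)
    (h : ∀ j, 1 ≤ j → j ≤ i → List.intercalate ['-'] (parts.take j) ∉ pvKeys) :
    pvWalkB parts i = none := by
  induction i with
  | zero => rfl
  | succ i ih =>
    simp only [pvWalkB, PySem.Chars.join]
    rw [if_neg, ih]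
    · intro j h1 h2; exact h j h1 (by omega)
    · simp only [List.contains_eq_mem, decide_eq_true_eq]  -- may need adjusting
      exact h (i + 1) (by omega) (le_refl _)

theorem pv_walk_some (parts : List (List Char)) (i j : Nat)
    (hj1 : 1 ≤ j) (hji : j ≤ i)
    (hmem : List.intercalate ['-'] (parts.take j) ∈ pvKeys)
    (habove : ∀ j', j < j' → j' ≤ i → List.intercalate ['-'] (parts.take j') ∉ pvKeys) :
    pvWalkB parts i = some (List.intercalate ['-'] (parts.take j)) := by
  induction i with
  | zero => omega
  | succ i ih =>
    simp only [pvWalkB, PySem.Chars.join]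
    rcases eq_or_lt_of_le hji with heq | hlt
    · rw [heq, if_pos (by simpa using (heq ▸ hmem))]
    · rw [if_neg]
      · exact ih (by omega) (fun j' h1 h2 => habove j' h1 (by omega))
      · simpa using habove (i + 1) (by omega) (le_refl _)

theorem pv_keys_pairwise :
    List.Pairwise (fun a b => ¬ ((a ++ ['-']) <+: b)) pvKeys := by decide

theorem pv_main (l : List Char) :
    pvScanA pvKeys l = pvWalkB (pvParts l) (pvParts l).length := by
  cases h : pvScanA pvKeys l with
  | none =>
    rw [pv_walk_none]
    intro j h1 h2 hmem
    have hpm : pvPm (pvCand l j) l := by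
      unfold pvPm
      rcases pv_cand_match l j h1 h2 with hc | hc
      · exact Or.inl hc.symm
      · exact Or.inr hc
    exact (pv_scanA_none_iff pvKeys l).mp h _ hmem hpm
  | some k =>
    obtain ⟨pre, post, hks, hpm, hpre⟩ := pv_scanA_some pvKeys l k h
    have hkmem : k ∈ pvKeys := by rw [hks]; simp
    -- k is a candidate
    have hcand : ∃ j, 1 ≤ j ∧ j ≤ (pvParts l).length ∧ pvCand l j = k := by
      rcases hpm with heq | hpf
      · refine ⟨(pvParts l).length, ?_, le_refl _, by rw [pv_cand_full l, heq]⟩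
        have hne := List.splitOnP_ne_nil (fun x => x == '-') l
        have : (pvParts l).length ≠ 0 := fun hz => hne (by simpa [pvParts] using List.eq_nil_of_length_eq_zero hz)
        omega
      · exact pv_key_cand l k hpf
    obtain ⟨j, hj1, hjn, hjc⟩ := hcand
    rw [pv_walk_some (pvParts l) (pvParts l).length j hj1 hjn (by rw [show List.intercalate ['-'] ((pvParts l).take j) = k from hjc]; exact hkmem) ?above]
    · rw [show List.intercalate ['-'] ((pvParts l).take j) = k from hjc]
    case above =>
      intro j' hjj' hj'n hmem'
      have hpf : (k ++ ['-']) <+: pvCand l j' := by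
        rw [← hjc]; exact pv_cand_prefix l j j' hj1 hjj' hj'n
      have hpml : pvPm (pvCand l j') l := by
        unfold pvPm
        rcases pv_cand_match l j' (by omega) hj'n with hc | hc
        · exact Or.inl hc.symm
        · exact Or.inr hc
      have hne : pvCand l j' ≠ k := by
        intro hcon
        have := hpf.length_le
        rw [hcon] at this
        simp at this
      -- pvCand l j' is in pvKeys; not in pre (it matches), not k, so in post; pairwise forbids
      have hmem'' : pvCand l j' ∈ pre ++ k :: post := by rw [← hks]; exact hmem'
      rcases List.mem_append.mp hmem'' with hin | hin
      · exact hpre _ hin hpml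
      · rcases List.mem_cons.mp hin with hceq | hin
        · exact hne hceq
        · have hpw := pv_keys_pairwise
          rw [hks] at hpw
          have := (List.pairwise_append.mp hpw).2.1
          exact (List.rel_of_pairwise_cons this hin) hpf

-- ===== VERDICT (by name: the statement is the Claim_ definition above) =====
theorem claude_pricing_key_spec : Claim_equal_claude_pricing_key := by
  intro model _
  unfold Spec_claude_pricing_key claude_pricing_key claude_pricing_key_alt
  by_cases hg : ((PySem.Chars.lower (PySem.Chars.strip model.toList)).isEmpty || PySem.Chars.startswith (PySem.Chars.lower (PySem.Chars.strip model.toList)) ['<']) = true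
  · simp only [hg, if_true]
  · simp only [Bool.not_eq_true] at hg
    simp only [hg, Bool.false_eq_true, if_false, pv_splitOn_eq]
    exact congrArg (Option.map String.ofList) (pv_main _)
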